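-- pv_equiv track=rewrite | github.com/velkrosmaak/musiclib-visualiser | mv.py | normalize_genres
-- ===== SOURCE A (Python) =====
-- def normalize_genres(genre_str):
--     if not genre_str:
--         return ['Unknown']
--     # split on common separators
--     sep_chars = [';', '/', ',', '|']
--     parts = [genre_str]
--     for s in sep_chars:
--         new_parts = []
--         for p in parts:
--             new_parts.extend([x.strip() for x in p.split(s) if x.strip()])
--         parts = new_parts
--     if not parts:
--         return ['Unknown']
--     # normalize casing
--     return [p.title() for p in parts]
-- ===== SOURCE B (Python) =====
-- def normalize_genres(genre_str):
--     if not genre_str: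
--         return ['Unknown']
--     # one left-to-right scan: flush the current chunk at every separator
--     seps = {';', '/', ',', '|'}
--     parts = []
--     cur = []
--     for ch in genre_str:
--         if ch in seps:
--             w = ''.join(cur).strip()
--             if w:
--                 parts.append(w)
--             cur = []
--         else:
--             cur.append(ch)
--     w = ''.join(cur).strip()
--     if w:
--         parts.append(w)
--     if not parts:
--         return ['Unknown']
--     return [p.title() for p in parts]
-- ===== Notes on version B (the rewrite author's own statement) =====
-- stated objective: alternative
-- what changed: B replaces A's four successive split-then-strip-then-filter passes over a growing list of parts by a single left-to-right character scan that flushes the current chunk (stripped, dropped if empty) at every separator.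
import Mathlib
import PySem

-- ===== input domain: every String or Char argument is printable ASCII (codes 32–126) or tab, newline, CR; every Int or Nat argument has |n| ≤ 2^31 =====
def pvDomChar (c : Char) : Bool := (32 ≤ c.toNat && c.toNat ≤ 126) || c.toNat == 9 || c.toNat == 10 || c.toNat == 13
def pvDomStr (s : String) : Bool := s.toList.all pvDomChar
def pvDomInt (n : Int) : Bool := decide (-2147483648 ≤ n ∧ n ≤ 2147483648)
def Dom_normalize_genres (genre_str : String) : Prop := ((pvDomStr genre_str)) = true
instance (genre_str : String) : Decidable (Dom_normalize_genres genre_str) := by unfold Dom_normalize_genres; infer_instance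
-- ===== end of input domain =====

-- B replaces A's four successive split-strip-filter passes over growing part lists by a single
-- left-to-right scan that flushes a chunk at every separator (objective: alternative decomposition).

-- shared helper: str.title() for ASCII (both Pythons call .title() on each part)
def pvTitle (prev : Bool) : List Char → List Char
  | [] => []
  | c :: rest =>
    if PySem.Chars.isalpha c then
      (if prev then PySem.Chars.lowerChar c else PySem.Chars.upperChar c) :: pvTitle true rest
    else c :: pvTitle false rest

-- ===== PORT A =====
def normalize_genres (genre_str : String) : List String :=
  if genre_str.toList = [] then ["Unknown"]
  else
    let sep_chars : List Char := [';', '/', ',', '|']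
    let parts := sep_chars.foldl
      (fun parts s =>
        parts.foldl
          (fun new_parts p =>
            new_parts ++
              ((PySem.Chars.splitOn p [s]).filter
                  (fun x => decide (PySem.Chars.strip x ≠ []))).map PySem.Chars.strip)
          [])
      [genre_str.toList]
    if parts = [] then ["Unknown"]
    else parts.map (fun p => String.mk (pvTitle false p))

-- ===== PORT B =====
def normalize_genres_alt (genre_str : String) : List String :=
  if genre_str.toList = [] then ["Unknown"]
  else
    let st := genre_str.toList.foldl
      (fun (st : List (List Char) × List Char) ch =>
        if ch ∈ ([';', '/', ',', '|'] : List Char) then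
          (if PySem.Chars.strip st.2 ≠ [] then st.1 ++ [PySem.Chars.strip st.2] else st.1, [])
        else (st.1, st.2 ++ [ch]))
      ([], [])
    let parts :=
      if PySem.Chars.strip st.2 ≠ [] then st.1 ++ [PySem.Chars.strip st.2] else st.1
    if parts = [] then ["Unknown"]
    else parts.map (fun p => String.mk (pvTitle false p))

-- ===== PRECONDITION & SPEC =====
def Spec_normalize_genres (genre_str : String) (out : List String) : Prop := out = normalize_genres_alt genre_str
instance (genre_str : String) (out : List String) : Decidable (Spec_normalize_genres genre_str out) := by unfold Spec_normalize_genres; infer_instance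

-- ===== CLAIM (what is proved, stated in full; the proofs are below) =====
def Claim_equal_normalize_genres : Prop := ∀ (genre_str : String), Dom_normalize_genres genre_str → Spec_normalize_genres genre_str (normalize_genres genre_str)

-- ===== LEMMAS AND PROOFS =====

-- splitting a char list at every occurrence of a char of S (simultaneous split)
def pvSplitAny (S : List Char) : List Char → List (List Char)
  | [] => [[]]
  | c :: rest => if c ∈ S then [] :: pvSplitAny S rest else (pvSplitAny S rest).modifyHead (c :: ·)

-- strip each piece and drop the empty ones
def pvF (S : List Char) (cs : List Char) : List (List Char) :=
  ((pvSplitAny S cs).map PySem.Chars.strip).filter (fun x => decide (x ≠ []))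

-- apply f to the last element
def pvMlast (f : List Char → List Char) : List (List Char) → List (List Char)
  | [] => []
  | [h] => [f h]
  | h :: t => h :: pvMlast f t

lemma pvSplitAny_nil (S : List Char) : pvSplitAny S [] = [[]] := rfl

lemma pvSplitAny_cons_mem {c : Char} {S : List Char} (rest : List Char) (h : c ∈ S) :
    pvSplitAny S (c :: rest) = [] :: pvSplitAny S rest := by
  simp [pvSplitAny, h]

lemma pvSplitAny_cons_not_mem {c : Char} {S : List Char} (rest : List Char) (h : c ∉ S) :
    pvSplitAny S (c :: rest) = (pvSplitAny S rest).modifyHead (c :: ·) := by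
  simp [pvSplitAny, h]

lemma pvSplitAny_ne_nil (S : List Char) (cs : List Char) : pvSplitAny S cs ≠ [] := by
  induction cs with
  | nil => simp [pvSplitAny]
  | cons c rest ih =>
    by_cases h : c ∈ S
    · simp [pvSplitAny_cons_mem rest h]
    · rw [pvSplitAny_cons_not_mem rest h]
      cases hsp : pvSplitAny S rest with
      | nil => exact absurd hsp ih
      | cons a t => simp [List.modifyHead]

lemma pvMlast_cons_of_ne (f : List Char → List Char) (a : List Char) (l : List (List Char))
    (h : l ≠ []) : pvMlast f (a :: l) = a :: pvMlast f l := by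
  cases l with
  | nil => exact absurd rfl h
  | cons b t => rfl

lemma pvModifyHead_nilapp (l : List (List Char)) :
    l.modifyHead (fun x => ([] : List Char) ++ x) = l := by
  cases l <;> rfl

lemma pvModifyHead_id (l : List (List Char)) : l.modifyHead (fun x => x) = l := by
  cases l <;> rfl

-- splitOn with a single-char separator is pvSplitAny
lemma pvGo_eq (s : Char) (cs : List Char) : ∀ (fuel : Nat) (cur : List Char)
    (acc : List (List Char)), cs.length < fuel →
    PySem.Chars.splitOn.go [s] fuel cs cur acc
      = acc.reverse ++ (pvSplitAny [s] cs).modifyHead (cur.reverse ++ ·) := by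
  induction cs with
  | nil =>
    intro fuel cur acc h
    obtain ⟨f, rfl⟩ : ∃ f, fuel = f + 1 := ⟨fuel - 1, by omega⟩
    simp [PySem.Chars.splitOn.go, pvSplitAny, List.modifyHead]
  | cons c rest ih =>
    intro fuel cur acc h
    obtain ⟨f, rfl⟩ : ∃ f, fuel = f + 1 := ⟨fuel - 1, by omega⟩
    rw [PySem.Chars.splitOn.go]
    by_cases hc : c = s
    · subst hc
      have hpre : [c].isPrefixOf (c :: rest) = true := by simp [List.isPrefixOf]
      rw [if_pos hpre]
      have hlen : rest.length < f := by simpa using Nat.lt_of_succ_lt_succ h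
      rw [show List.drop [c].length (c :: rest) = rest by simp]
      rw [ih f [] (cur.reverse :: acc) hlen]
      cases hsp : pvSplitAny [c] rest with
      | nil => exact absurd hsp (pvSplitAny_ne_nil _ _)
      | cons a t => simp [pvSplitAny, List.modifyHead, hsp]
    · have hpre : [s].isPrefixOf (c :: rest) = false := by
        simp [List.isPrefixOf, beq_iff_eq]
        exact fun hh => absurd hh.symm hc
      rw [if_neg (by simp [hpre])]
      have hlen : rest.length < f := Nat.lt_of_succ_lt_succ h
      rw [ih f (c :: cur) acc hlen]
      cases hsp : pvSplitAny [s] rest with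
      | nil => exact absurd hsp (pvSplitAny_ne_nil _ _)
      | cons a t =>
        simp [pvSplitAny, hsp, List.modifyHead, hc, List.append_assoc]

lemma pvSplitOn_eq (s : Char) (cs : List Char) :
    PySem.Chars.splitOn cs [s] = pvSplitAny [s] cs := by
  unfold PySem.Chars.splitOn
  rw [pvGo_eq s cs (cs.length + 1) [] [] (Nat.lt_succ_self _)]
  simp [pvModifyHead_id]

-- strip basics
lemma pvLstrip_cons_space {c : Char} (t : List Char) (h : PySem.Chars.isspace c = true) :
    PySem.Chars.lstrip (c :: t) = PySem.Chars.lstrip t := by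
  simp [PySem.Chars.lstrip, List.dropWhile_cons, h]

lemma pvLstrip_cons_nonspace {c : Char} (t : List Char) (h : PySem.Chars.isspace c = false) :
    PySem.Chars.lstrip (c :: t) = c :: t := by
  simp [PySem.Chars.lstrip, List.dropWhile_cons, h]

lemma pvRstrip_cons (c : Char) (t : List Char) :
    PySem.Chars.rstrip (c :: t)
      = if PySem.Chars.rstrip t = [] then (if PySem.Chars.isspace c then [] else [c])
        else c :: PySem.Chars.rstrip t := by
  by_cases h : PySem.Chars.rstrip t = []
  · rw [if_pos h]
    have h' : List.dropWhile PySem.Chars.isspace t.reverse = [] := by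
      simpa [PySem.Chars.rstrip] using h
    show (List.dropWhile PySem.Chars.isspace (c :: t).reverse).reverse = _
    rw [List.reverse_cons, List.dropWhile_append, if_pos (by simp [h'])]
    by_cases hc : PySem.Chars.isspace c
    · simp [List.dropWhile_cons, hc]
    · simp [List.dropWhile_cons, hc]
  · rw [if_neg h]
    have h' : List.dropWhile PySem.Chars.isspace t.reverse ≠ [] := by
      simpa [PySem.Chars.rstrip] using h
    show (List.dropWhile PySem.Chars.isspace (c :: t).reverse).reverse = _
    rw [List.reverse_cons, List.dropWhile_append, if_neg (by simp [h'])]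
    simp [PySem.Chars.rstrip]

lemma pvRstrip_cons_nonspace {c : Char} (t : List Char) (h : PySem.Chars.isspace c = false) :
    PySem.Chars.rstrip (c :: t) = c :: PySem.Chars.rstrip t := by
  rw [pvRstrip_cons]
  by_cases h2 : PySem.Chars.rstrip t = []
  · rw [if_pos h2, if_neg (by simp [h]), h2]
  · rw [if_neg h2]

lemma pvRstrip_eq_nil_iff (p : List Char) :
    PySem.Chars.rstrip p = [] ↔ ∀ c ∈ p, PySem.Chars.isspace c = true := by
  simp [PySem.Chars.rstrip, List.dropWhile_eq_nil_iff]

lemma pvLstrip_eq_nil_iff (p : List Char) :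
    PySem.Chars.lstrip p = [] ↔ ∀ c ∈ p, PySem.Chars.isspace c = true := by
  simp [PySem.Chars.lstrip, List.dropWhile_eq_nil_iff]

lemma pvStrip_nil : PySem.Chars.strip [] = [] := rfl

lemma pvLstrip_idem (p : List Char) :
    PySem.Chars.lstrip (PySem.Chars.lstrip p) = PySem.Chars.lstrip p := by
  simp [PySem.Chars.lstrip, List.dropWhile_idempotent]

lemma pvRstrip_idem (p : List Char) :
    PySem.Chars.rstrip (PySem.Chars.rstrip p) = PySem.Chars.rstrip p := by
  simp [PySem.Chars.rstrip, List.dropWhile_idempotent]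

lemma pvLstrip_rstrip_comm (p : List Char) :
    PySem.Chars.lstrip (PySem.Chars.rstrip p) = PySem.Chars.rstrip (PySem.Chars.lstrip p) := by
  induction p with
  | nil => rfl
  | cons c t ih =>
    by_cases hc : PySem.Chars.isspace c
    · rw [pvLstrip_cons_space t hc, pvRstrip_cons]
      by_cases ht : PySem.Chars.rstrip t = []
      · rw [if_pos ht, if_pos hc]
        have hall := (pvRstrip_eq_nil_iff t).mp ht
        have hl : PySem.Chars.lstrip t = [] := (pvLstrip_eq_nil_iff t).mpr hall
        rw [hl]
        rfl
      · rw [if_neg ht, pvLstrip_cons_space _ hc, ih]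
    · have hc' : PySem.Chars.isspace c = false := by simpa using hc
      rw [pvRstrip_cons_nonspace t hc', pvLstrip_cons_nonspace _ hc',
        pvLstrip_cons_nonspace t hc', pvRstrip_cons_nonspace t hc']

lemma pvStrip_lstrip (p : List Char) :
    PySem.Chars.strip (PySem.Chars.lstrip p) = PySem.Chars.strip p := by
  simp [PySem.Chars.strip, pvLstrip_idem]

lemma pvStrip_rstrip (p : List Char) :
    PySem.Chars.strip (PySem.Chars.rstrip p) = PySem.Chars.strip p := by
  simp [PySem.Chars.strip, pvLstrip_rstrip_comm, pvRstrip_idem]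

-- pvSplitAny under lstrip / rstrip (separators are not whitespace)
lemma pvSplitAny_nosep (S : List Char) (p : List Char) (h : ∀ c ∈ p, c ∉ S) :
    pvSplitAny S p = [p] := by
  induction p with
  | nil => rfl
  | cons c t ih =>
    have hc : c ∉ S := h c (by simp)
    have ht := ih (fun x hx => h x (by simp [hx]))
    rw [pvSplitAny_cons_not_mem t hc, ht]
    rfl

lemma pvSplitAny_singleton (S : List Char) : ∀ (p h : List Char),
    pvSplitAny S p = [h] → h = p := by
  intro p
  induction p with
  | nil =>
    intro h hsp
    rw [pvSplitAny_nil] at hsp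
    injection hsp with h1 _
    exact h1.symm
  | cons c t ih =>
    intro h hsp
    by_cases hc : c ∈ S
    · rw [pvSplitAny_cons_mem t hc] at hsp
      injection hsp with _ h2
      exact absurd h2 (pvSplitAny_ne_nil _ _)
    · rw [pvSplitAny_cons_not_mem t hc] at hsp
      cases hsp2 : pvSplitAny S t with
      | nil => exact absurd hsp2 (pvSplitAny_ne_nil _ _)
      | cons a l =>
        rw [hsp2] at hsp
        simp only [List.modifyHead] at hsp
        injection hsp with h1 h2
        subst h2
        rw [← h1, ih a hsp2]

lemma pvSplitAny_lstrip (S : List Char) (p : List Char)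
    (hS : ∀ c ∈ S, PySem.Chars.isspace c = false) :
    pvSplitAny S (PySem.Chars.lstrip p) = (pvSplitAny S p).modifyHead PySem.Chars.lstrip := by
  induction p with
  | nil => rfl
  | cons c t ih =>
    by_cases hc : PySem.Chars.isspace c
    · have hcS : c ∉ S := fun hmem => by rw [hS c hmem] at hc; cases hc
      rw [pvLstrip_cons_space t hc, ih, pvSplitAny_cons_not_mem t hcS]
      cases hsp : pvSplitAny S t with
      | nil => exact absurd hsp (pvSplitAny_ne_nil _ _)
      | cons a l => simp [List.modifyHead, pvLstrip_cons_space a hc]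
    · have hc' : PySem.Chars.isspace c = false := by simpa using hc
      rw [pvLstrip_cons_nonspace t hc']
      by_cases hcS : c ∈ S
      · rw [pvSplitAny_cons_mem t hcS]
        simp [List.modifyHead, PySem.Chars.lstrip]
      · rw [pvSplitAny_cons_not_mem t hcS]
        cases hsp : pvSplitAny S t with
        | nil => exact absurd hsp (pvSplitAny_ne_nil _ _)
        | cons a l => simp [List.modifyHead, pvLstrip_cons_nonspace a hc']

lemma pvSplitAny_rstrip (S : List Char) (p : List Char)
    (hS : ∀ c ∈ S, PySem.Chars.isspace c = false) :
    pvSplitAny S (PySem.Chars.rstrip p) = pvMlast PySem.Chars.rstrip (pvSplitAny S p) := by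
  induction p with
  | nil => rfl
  | cons c t ih =>
    rw [pvRstrip_cons c t]
    by_cases ht : PySem.Chars.rstrip t = []
    · have hall := (pvRstrip_eq_nil_iff t).mp ht
      have htno : ∀ x ∈ t, x ∉ S := fun x hx hmem => by
        have h1 := hall x hx
        rw [hS x hmem] at h1
        cases h1
      have hsp : pvSplitAny S t = [t] := pvSplitAny_nosep S t htno
      rw [if_pos ht]
      by_cases hc : PySem.Chars.isspace c
      · have hcS : c ∉ S := fun hmem => by rw [hS c hmem] at hc; cases hc
        rw [if_pos hc, pvSplitAny_cons_not_mem t hcS, hsp]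
        have hr : PySem.Chars.rstrip (c :: t) = [] := by
          rw [pvRstrip_cons, if_pos ht, if_pos hc]
        simp [List.modifyHead, pvMlast, hr, pvSplitAny_nil]
      · have hc' : PySem.Chars.isspace c = false := by simpa using hc
        rw [if_neg hc]
        by_cases hcS : c ∈ S
        · rw [pvSplitAny_cons_mem t hcS, hsp, pvSplitAny_cons_mem ([] : List Char) hcS]
          simp [pvMlast, ht, pvSplitAny_nil]
        · rw [pvSplitAny_cons_not_mem t hcS, hsp, pvSplitAny_cons_not_mem ([] : List Char) hcS]
          have hr : PySem.Chars.rstrip (c :: t) = [c] := by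
            rw [pvRstrip_cons, if_pos ht, if_neg (by simp [hc'])]
          simp [List.modifyHead, pvMlast, hr, pvSplitAny_nil]
    · rw [if_neg ht]
      by_cases hcS : c ∈ S
      · rw [pvSplitAny_cons_mem _ hcS, pvSplitAny_cons_mem _ hcS, ih,
          pvMlast_cons_of_ne _ _ _ (pvSplitAny_ne_nil S t)]
      · rw [pvSplitAny_cons_not_mem _ hcS, pvSplitAny_cons_not_mem _ hcS, ih]
        cases hsp : pvSplitAny S t with
        | nil => exact absurd hsp (pvSplitAny_ne_nil _ _)
        | cons a l =>
          cases l with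
          | nil =>
            have ha : a = t := pvSplitAny_singleton S t a hsp
            have hr : PySem.Chars.rstrip (c :: a) = c :: PySem.Chars.rstrip a := by
              rw [pvRstrip_cons, ha, if_neg ht]
            simp [List.modifyHead, pvMlast, hr]
          | cons b l2 =>
            rw [pvMlast_cons_of_ne _ _ _ (by simp : (b :: l2 : List (List Char)) ≠ [])]
            simp [List.modifyHead,
              pvMlast_cons_of_ne _ _ _ (by simp : (b :: l2 : List (List Char)) ≠ [])]

-- map strip absorbs the edge adjustments
lemma pvMapStrip_mlast (l : List (List Char)) :
    (pvMlast PySem.Chars.rstrip l).map PySem.Chars.strip = l.map PySem.Chars.strip := by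
  induction l with
  | nil => rfl
  | cons a t ih =>
    cases t with
    | nil => simp [pvMlast, pvStrip_rstrip]
    | cons b t2 =>
      rw [pvMlast_cons_of_ne _ _ _ (by simp : (b :: t2 : List (List Char)) ≠ []),
        List.map_cons, ih]
      simp

lemma pvMapStrip_modifyHead (l : List (List Char)) :
    (l.modifyHead PySem.Chars.lstrip).map PySem.Chars.strip = l.map PySem.Chars.strip := by
  cases l with
  | nil => rfl
  | cons a t => simp [List.modifyHead, pvStrip_lstrip]

-- pvF is invariant under pre-stripping
lemma pvF_nil (T : List Char) : pvF T [] = [] := by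
  simp [pvF, pvSplitAny_nil, pvStrip_nil]

lemma pvF_strip (T : List Char) (p : List Char)
    (hT : ∀ c ∈ T, PySem.Chars.isspace c = false) :
    pvF T (PySem.Chars.strip p) = pvF T p := by
  unfold pvF
  rw [show PySem.Chars.strip p = PySem.Chars.rstrip (PySem.Chars.lstrip p) from rfl]
  rw [pvSplitAny_rstrip T _ hT, pvSplitAny_lstrip T p hT, pvMapStrip_mlast,
    pvMapStrip_modifyHead]

-- sequential splitting composes to simultaneous splitting
lemma pvSplitAny_comp (S T : List Char) (cs : List Char) :
    (pvSplitAny S cs).flatMap (pvSplitAny T) = pvSplitAny (S ++ T) cs := by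
  induction cs with
  | nil => simp [pvSplitAny]
  | cons c rest ih =>
    by_cases hcS : c ∈ S
    · have hcST : c ∈ S ++ T := by simp [hcS]
      rw [pvSplitAny_cons_mem rest hcS, pvSplitAny_cons_mem rest hcST, List.flatMap_cons,
        pvSplitAny_nil, ih]
      rfl
    · cases hsp : pvSplitAny S rest with
      | nil => exact absurd hsp (pvSplitAny_ne_nil _ _)
      | cons h t =>
        rw [hsp] at ih
        by_cases hcT : c ∈ T
        · have hcST : c ∈ S ++ T := by simp [hcT]
          rw [pvSplitAny_cons_not_mem rest hcS, pvSplitAny_cons_mem rest hcST, hsp, ← ih]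
          simp [List.modifyHead, List.flatMap_cons, pvSplitAny_cons_mem h hcT]
        · have hcST : c ∉ S ++ T := by simp [hcS, hcT]
          rw [pvSplitAny_cons_not_mem rest hcS, pvSplitAny_cons_not_mem rest hcST, hsp, ← ih]
          cases hsp2 : pvSplitAny T h with
          | nil => exact absurd hsp2 (pvSplitAny_ne_nil _ _)
          | cons a l =>
            simp [List.modifyHead, List.flatMap_cons, pvSplitAny_cons_not_mem h hcT, hsp2]

lemma pvF_append (S T : List Char) (cs : List Char) :
    pvF (S ++ T) cs = (pvSplitAny S cs).flatMap (pvF T) := by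
  unfold pvF
  rw [← pvSplitAny_comp S T cs, List.map_flatMap, List.filter_flatMap]

lemma pvFlatMap_stripfilter (l : List (List Char)) (f : List Char → List (List Char))
    (hf : f [] = []) :
    ((l.map PySem.Chars.strip).filter (fun x => decide (x ≠ []))).flatMap f
      = l.flatMap (fun x => f (PySem.Chars.strip x)) := by
  induction l with
  | nil => rfl
  | cons a t ih =>
    rw [List.map_cons, List.filter_cons]
    by_cases h : PySem.Chars.strip a = []
    · rw [if_neg (by simp [h]), ih, List.flatMap_cons, h, hf, List.nil_append]
    · rw [if_pos (by simp [h]), List.flatMap_cons, ih, List.flatMap_cons]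

-- the key composition step
lemma pvKey (s : Char) (T : List Char) (p : List Char)
    (hT : ∀ c ∈ T, PySem.Chars.isspace c = false) :
    (pvF [s] p).flatMap (pvF T) = pvF (s :: T) p := by
  rw [show (s :: T) = [s] ++ T from rfl, pvF_append]
  rw [show pvF [s] p
      = ((pvSplitAny [s] p).map PySem.Chars.strip).filter (fun x => decide (x ≠ [])) from rfl]
  rw [pvFlatMap_stripfilter _ _ (pvF_nil T)]
  have heq : (fun x => pvF T (PySem.Chars.strip x)) = pvF T :=
    funext fun x => pvF_strip T x hT
  rw [heq]

-- A's per-separator pass is a flatMap of pvF over the current parts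
lemma pvStageA (s : Char) (parts : List (List Char)) :
    parts.foldl
      (fun new_parts p =>
        new_parts ++
          ((PySem.Chars.splitOn p [s]).filter
              (fun x => decide (PySem.Chars.strip x ≠ []))).map PySem.Chars.strip)
      [] = parts.flatMap (pvF [s]) := by
  rw [PySem.List.foldl_append_eq_flatMap]
  simp only [List.nil_append]
  congr 1
  funext p
  rw [pvSplitOn_eq, pvF, List.filter_map]
  rfl

-- the scan step and the final flush of B, named for the proofs
def pvStep (st : List (List Char) × List Char) (ch : Char) : List (List Char) × List Char :=
  if ch ∈ ([';', '/', ',', '|'] : List Char) then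
    (if PySem.Chars.strip st.2 ≠ [] then st.1 ++ [PySem.Chars.strip st.2] else st.1, [])
  else (st.1, st.2 ++ [ch])

def pvFlush (st : List (List Char) × List Char) : List (List Char) :=
  if PySem.Chars.strip st.2 ≠ [] then st.1 ++ [PySem.Chars.strip st.2] else st.1

lemma pvFlush_eq (st : List (List Char) × List Char) :
    pvFlush st = if PySem.Chars.strip st.2 ≠ [] then st.1 ++ [PySem.Chars.strip st.2] else st.1 :=
  rfl

-- B's scan computes pvF of the whole string
lemma pvScanB (cs : List Char) : ∀ (parts : List (List Char)) (cur : List Char),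
    pvFlush (cs.foldl pvStep (parts, cur))
      = parts ++ (((pvSplitAny [';', '/', ',', '|'] cs).modifyHead (cur ++ ·)).map
          PySem.Chars.strip).filter (fun x => decide (x ≠ [])) := by
  induction cs with
  | nil =>
    intro parts cur
    simp only [List.foldl_nil, pvSplitAny_nil, List.modifyHead, List.map_cons, List.map_nil,
      List.append_nil, pvFlush]
    by_cases h : PySem.Chars.strip cur = [] <;> simp [h]
  | cons c rest ih =>
    intro parts cur
    rw [List.foldl_cons]
    by_cases hc : c ∈ ([';', '/', ',', '|'] : List Char)
    · rw [show pvStep (parts, cur) c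
          = (if PySem.Chars.strip cur ≠ [] then parts ++ [PySem.Chars.strip cur] else parts, [])
          from by simp [pvStep, hc]]
      rw [ih _ [], pvSplitAny_cons_mem rest hc]
      cases hsp : pvSplitAny [';', '/', ',', '|'] rest with
      | nil => exact absurd hsp (pvSplitAny_ne_nil _ _)
      | cons a t =>
        by_cases h : PySem.Chars.strip cur = [] <;>
          simp [h, hsp, List.modifyHead, List.append_assoc]
    · rw [show pvStep (parts, cur) c = (parts, cur ++ [c]) from by simp [pvStep, hc]]
      rw [ih parts (cur ++ [c]), pvSplitAny_cons_not_mem rest hc]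
      cases hsp : pvSplitAny [';', '/', ',', '|'] rest with
      | nil => exact absurd hsp (pvSplitAny_ne_nil _ _)
      | cons a t => simp [hsp, List.modifyHead, List.append_assoc]

lemma pvSepsNonspace : ∀ c ∈ ([';', '/', ',', '|'] : List Char),
    PySem.Chars.isspace c = false := by
  intro c hc
  simp only [List.mem_cons, List.mem_singleton, List.not_mem_nil, or_false] at hc
  rcases hc with rfl | rfl | rfl | rfl <;> decide

-- main: the two part lists coincide
lemma pvPartsEq (cs : List Char) :
    ([';', '/', ',', '|'] : List Char).foldl
      (fun parts s =>
        parts.foldl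
          (fun new_parts p =>
            new_parts ++
              ((PySem.Chars.splitOn p [s]).filter
                  (fun x => decide (PySem.Chars.strip x ≠ []))).map PySem.Chars.strip)
          [])
      [cs]
    = pvFlush (cs.foldl pvStep (([] : List (List Char)), ([] : List Char))) := by
  rw [pvScanB cs [] []]
  simp only [List.nil_append, pvModifyHead_nilapp, pvModifyHead_id]
  simp only [List.foldl_cons, List.foldl_nil]
  rw [pvStageA, pvStageA, pvStageA]
  rw [List.nil_append, pvSplitOn_eq]
  rw [show ((pvSplitAny [';'] cs).filter
        (fun x => decide (PySem.Chars.strip x ≠ []))).map PySem.Chars.strip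
      = pvF [';'] cs from by rw [pvF, List.filter_map]; rfl]
  rw [List.flatMap_assoc, List.flatMap_assoc]
  have h1 : (fun q => (pvF [','] q).flatMap (pvF ['|'])) = pvF [',', '|'] :=
    funext fun q => pvKey ',' ['|'] q (fun c hc => pvSepsNonspace c (by simp only [List.mem_cons, List.mem_singleton, List.not_mem_nil, or_false] at hc ⊢; tauto))
  simp only [h1]
  have h2 : (fun p => (pvF ['/'] p).flatMap (pvF [',', '|'])) = pvF ['/', ',', '|'] :=
    funext fun p => pvKey '/' [',', '|'] p (fun c hc => pvSepsNonspace c (by simp only [List.mem_cons, List.mem_singleton, List.not_mem_nil, or_false] at hc ⊢; tauto))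
  simp only [h2]
  rw [pvKey ';' ['/', ',', '|'] cs (fun c hc => pvSepsNonspace c (by simp only [List.mem_cons, List.mem_singleton, List.not_mem_nil, or_false] at hc ⊢; tauto))]
  rfl

-- ===== VERDICT (by name: the statement is the Claim_ definition above) =====
set_option maxRecDepth 16384 in
theorem normalize_genres_spec : Claim_equal_normalize_genres := by
  intro genre_str _
  unfold Spec_normalize_genres normalize_genres normalize_genres_alt
  by_cases h : genre_str.toList = []
  · simp [h]
  · rw [if_neg h, if_neg h]
    dsimp only
    rw [show (fun (st : List (List Char) × List Char) ch =>
        if ch ∈ ([';', '/', ',', '|'] : List Char) then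
          (if PySem.Chars.strip st.2 ≠ [] then st.1 ++ [PySem.Chars.strip st.2] else st.1, [])
        else (st.1, st.2 ++ [ch])) = pvStep from rfl]
    rw [← pvFlush_eq]
    rw [pvPartsEq genre_str.toList]
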